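-- pv_equiv track=rewrite | github.com/francool57/FProg-Resolucoes | LAB06-07/ex6.py | num_para_seq_cod
-- ===== SOURCE A (Python) =====
-- def num_para_seq_cod(n):
--     pares = [0, 2, 4, 6, 8]
--     impares = [1, 3, 5, 7, 9]
--     tup = tuple()
--
--     while n > 0:
--         ld = n % 10
--         if ld % 2 == 0:
--             a = pares[pares.index(ld)+1] if ld != 8 else 0
--         else:
--             a = impares[impares.index(ld)-1] if ld != 1 else 9
--         tup += (a,)
--         n //= 10
--
--     return tup[::-1]
-- ===== SOURCE B (Python) =====
-- def num_para_seq_cod(n):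
--     if n <= 0:
--         return ()
--     return tuple((int(c) + 2) % 10 if int(c) % 2 == 0 else (int(c) - 2) % 10
--                  for c in str(n))
-- ===== Notes on version B (the rewrite author's own statement) =====
-- stated objective: simpler
-- what changed: Replaces the mod/floordiv loop with table .index lookups and a final tuple reversal by a single left-to-right pass over str(n) applying per digit the closed form add-two (even) / subtract-two (odd) modulo ten.
import Mathlib
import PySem

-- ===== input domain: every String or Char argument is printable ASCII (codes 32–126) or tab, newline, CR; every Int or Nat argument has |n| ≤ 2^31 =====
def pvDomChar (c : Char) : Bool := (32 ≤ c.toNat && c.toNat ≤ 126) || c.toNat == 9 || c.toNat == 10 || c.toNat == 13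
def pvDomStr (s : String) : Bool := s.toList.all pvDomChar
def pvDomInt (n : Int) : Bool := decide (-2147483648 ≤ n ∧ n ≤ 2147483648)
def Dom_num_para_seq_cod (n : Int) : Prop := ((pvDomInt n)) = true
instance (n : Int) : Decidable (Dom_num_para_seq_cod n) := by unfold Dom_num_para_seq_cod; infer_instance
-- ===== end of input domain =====

-- B replaces A's mod/floordiv loop with table lookups and a final reversal by one
-- left-to-right pass over str(n) using a per-digit closed form — objective: simpler.

-- ===== PORT A =====
-- termination helper for the while-loop recursion (cited by decreasing_by)
theorem pvFloordivTen_lt (n : Int) (h : n > 0) :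
    (PySem.Int.floordiv n 10).toNat < n.toNat := by
  have he : PySem.Int.floordiv n 10 = n / 10 := by
    rw [PySem.Int.floordiv, Int.fdiv_eq_ediv]
    simp [show (0:Int) ≤ 10 by norm_num]
  rw [he]
  omega

def numParaSeqCodLoop (n : Int) (tup : List Int) : List Int :=
  if h : n > 0 then
    let ld := PySem.Int.mod n 10
    let a : Int :=
      if PySem.Int.mod ld 2 == 0 then
        if ld != 8 then
          (PySem.List.pyGet? ([0, 2, 4, 6, 8] : List Int)
            (((PySem.List.index? ([0, 2, 4, 6, 8] : List Int) ld).getD 0 : Int) + 1)).getD 0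
        else 0
      else
        if ld != 1 then
          (PySem.List.pyGet? ([1, 3, 5, 7, 9] : List Int)
            (((PySem.List.index? ([1, 3, 5, 7, 9] : List Int) ld).getD 0 : Int) - 1)).getD 0
        else 9
    numParaSeqCodLoop (PySem.Int.floordiv n 10) (tup ++ [a])
  else
    tup.reverse  -- tup[::-1]
termination_by n.toNat
decreasing_by exact pvFloordivTen_lt n h

def num_para_seq_cod (n : Int) : List Int :=
  numParaSeqCodLoop n []

-- ===== PORT B =====
-- the generator's per-character expression of Source B, as a named helper
def pvBStep (c : Char) : Int :=
  let d : Int := (PySem.Int.ofStr? (String.mk [c])).getD 0  -- int(c); always a digit here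
  if PySem.Int.mod d 2 == 0 then PySem.Int.mod (d + 2) 10
  else PySem.Int.mod (d - 2) 10

def num_para_seq_cod_alt (n : Int) : List Int :=
  if n ≤ 0 then []
  else (PySem.Int.toStr n).toList.map pvBStep

-- ===== PRECONDITION & SPEC =====
def Spec_num_para_seq_cod (n : Int) (out : List Int) : Prop := out = num_para_seq_cod_alt n
instance (n : Int) (out : List Int) : Decidable (Spec_num_para_seq_cod n out) := by unfold Spec_num_para_seq_cod; infer_instance

-- ===== CLAIM (what is proved, stated in full; the proofs are below) =====
def Claim_equal_num_para_seq_cod : Prop := ∀ (n : Int), Dom_num_para_seq_cod n → Spec_num_para_seq_cod n (num_para_seq_cod n)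

-- ===== LEMMAS AND PROOFS =====

-- the common per-digit transform, on a digit 0 ≤ d < 10
def pvTf (d : Nat) : Int :=
  if d % 2 = 0 then ((d : Int) + 2).fmod 10 else ((d : Int) - 2).fmod 10

theorem pvFmod_ten (n : Int) (h : 0 < n) :
    PySem.Int.mod n 10 = ((n.toNat % 10 : Nat) : Int) := by
  have : n.fmod 10 = n % 10 := by
    rw [Int.fmod_eq_emod]; simp
  simp [PySem.Int.mod, this]
  omega

theorem pvFdiv_ten (n : Int) (h : 0 < n) :
    (PySem.Int.floordiv n 10).toNat = n.toNat / 10 := by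
  have : PySem.Int.floordiv n 10 = n / 10 := by
    rw [PySem.Int.floordiv, Int.fdiv_eq_ediv]
    simp [show (0:Int) ≤ 10 by norm_num]
  rw [this]
  omega

-- A's branchy table computation equals the closed form, digit by digit
theorem pvA_step (d : Nat) (hd : d < 10) :
    (if PySem.Int.mod (d : Int) 2 == 0 then
        if (d : Int) != 8 then
          (PySem.List.pyGet? ([0, 2, 4, 6, 8] : List Int)
            (((PySem.List.index? ([0, 2, 4, 6, 8] : List Int) (d : Int)).getD 0 : Int) + 1)).getD 0
        else 0
      else
        if (d : Int) != 1 then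
          (PySem.List.pyGet? ([1, 3, 5, 7, 9] : List Int)
            (((PySem.List.index? ([1, 3, 5, 7, 9] : List Int) (d : Int)).getD 0 : Int) - 1)).getD 0
        else 9) = pvTf d := by
  interval_cases d <;> decide

theorem pvLoop_eq (k : Nat) : ∀ (n : Int), n.toNat ≤ k → ∀ (tup : List Int),
    numParaSeqCodLoop n tup = (tup ++ (Nat.digits 10 n.toNat).map pvTf).reverse := by
  induction k with
  | zero =>
    intro n hn tup
    rw [numParaSeqCodLoop]
    have h0 : n.toNat = 0 := by omega
    have : ¬ n > 0 := by omega
    simp [this, h0]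
  | succ k ih =>
    intro n hn tup
    rw [numParaSeqCodLoop]
    by_cases h : n > 0
    · simp only [h, dite_true]
      rw [ih (PySem.Int.floordiv n 10) (by have := pvFdiv_ten n h; omega)]
      have hdig : Nat.digits 10 n.toNat = n.toNat % 10 :: Nat.digits 10 (n.toNat / 10) :=
        Nat.digits_def' (by norm_num) (by omega)
      rw [pvFdiv_ten n h, hdig, pvFmod_ten n h,
          pvA_step (n.toNat % 10) (Nat.mod_lt _ (by norm_num))]
      simp
    · have h0 : n.toNat = 0 := by omega
      simp [h, h0]

theorem pvA_closed (n : Int) :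
    num_para_seq_cod n = ((Nat.digits 10 n.toNat).map pvTf).reverse := by
  have := pvLoop_eq n.toNat n le_rfl []
  simpa [num_para_seq_cod] using this

-- Nat.toDigits is the big-endian digitChar rendering of Nat.digits (for positive input)
theorem pvToDigitsCore_eq (f : Nat) : ∀ (n : Nat), 0 < n → n < f → ∀ (ds : List Char),
    Nat.toDigitsCore 10 f n ds = ((Nat.digits 10 n).map Nat.digitChar).reverse ++ ds := by
  induction f with
  | zero => intro n h1 h2; omega
  | succ f ih =>
    intro n h1 h2 ds
    rw [Nat.toDigitsCore]
    have hdig : Nat.digits 10 n = n % 10 :: Nat.digits 10 (n / 10) :=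
      Nat.digits_def' (by norm_num) h1
    by_cases hz : n / 10 = 0
    · simp [hz, hdig]
    · simp only [hz, if_false]
      rw [ih (n / 10) (by omega) (by omega)]
      simp [hdig]

theorem pvToDigits_eq (n : Nat) (h : 0 < n) :
    Nat.toDigits 10 n = ((Nat.digits 10 n).map Nat.digitChar).reverse := by
  rw [Nat.toDigits, pvToDigitsCore_eq (n + 1) n h (by omega)]
  simp

-- B's per-character body applied to a digit character is the closed-form transform
theorem pvB_char (d : Nat) (hd : d < 10) :
    pvBStep (Nat.digitChar d) = pvTf d := by
  interval_cases d <;> decide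

-- ===== VERDICT (by name: the statement is the Claim_ definition above) =====

theorem num_para_seq_cod_spec : Claim_equal_num_para_seq_cod := by
  intro n _
  unfold Spec_num_para_seq_cod
  rw [pvA_closed]
  unfold num_para_seq_cod_alt
  by_cases h : n ≤ 0
  · have h0 : n.toNat = 0 := by omega
    rw [if_pos h, h0]
    simp
  · have hpos : 0 < n := by omega
    have hchars : (PySem.Int.toStr n).toList = Nat.toDigits 10 n.toNat := by
      rw [PySem.Int.toList_toStr]
      simp [PySem.Int.toChars, not_lt.mpr (le_of_lt hpos)]
    simp only [h, if_false, hchars,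
      pvToDigits_eq n.toNat (by omega)]
    rw [List.map_reverse, List.map_map]
    congr 1
    apply List.map_congr_left
    intro d hd
    simp only [Function.comp_apply]
    exact (pvB_char d (Nat.digits_lt_base (by norm_num) hd)).symm
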